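-- pv_equiv track=rewrite | github.com/Vignesh-99999/pdf-text-mining-nlp | main.py | ChunkTextCleaning
-- ===== SOURCE A (Python) =====
-- def ChunkTextCleaning(Chunks):
--     """Clean text chunks and split into tokens (words)."""
--     AllTokens = []
--     for Chunk in Chunks:
--         Chunk = Chunk.lower().strip()
--         for P in [".","?","!",",", ";", ":", "(", ")", "[", "]", "\"", "'"]:
--             Chunk = Chunk.replace(P," ")
--         tokens = Chunk.split()
--         AllTokens.append(tokens)
--     return AllTokens
-- ===== SOURCE B (Python) =====
-- _DELIMS = set(".?!,;:()[]\"'")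
--
--
-- def _tokenize(chunk):
--     """One left-to-right scan: flush the current word at whitespace/punctuation."""
--     tokens = []
--     word = []
--     for ch in chunk.lower():
--         if ch.isspace() or ch in _DELIMS:
--             if word:
--                 tokens.append(''.join(word))
--                 word = []
--         else:
--             word.append(ch)
--     if word:
--         tokens.append(''.join(word))
--     return tokens
--
--
-- def ChunkTextCleaning(Chunks):
--     return [_tokenize(chunk) for chunk in Chunks]
-- ===== Notes on version B (the rewrite author's own statement) =====
-- stated objective: alternative
-- what changed: Replaces A's pipeline of 12 whole-string replace passes plus strip and split with a single left-to-right character scan per chunk that flushes the current word at whitespace or at one of the 12 delimiters.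
import Mathlib
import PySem

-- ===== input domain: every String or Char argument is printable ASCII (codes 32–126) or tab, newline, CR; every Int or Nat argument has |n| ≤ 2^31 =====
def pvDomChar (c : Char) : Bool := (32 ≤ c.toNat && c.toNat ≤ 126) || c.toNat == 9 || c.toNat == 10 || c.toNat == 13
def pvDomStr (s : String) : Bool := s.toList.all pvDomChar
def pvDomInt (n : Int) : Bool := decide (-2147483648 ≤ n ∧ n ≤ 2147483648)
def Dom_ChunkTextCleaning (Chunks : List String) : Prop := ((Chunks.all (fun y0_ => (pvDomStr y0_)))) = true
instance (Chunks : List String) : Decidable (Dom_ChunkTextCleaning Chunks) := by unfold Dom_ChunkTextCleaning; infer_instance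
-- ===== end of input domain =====

-- B replaces A's 12 whole-string replace passes (+ strip + split) with a single
-- left-to-right character scan per chunk (alternative one-pass tokenizer).

-- ===== PORT A =====
def ChunkTextCleaning (Chunks : List String) : List (List String) :=
  Chunks.foldl (fun AllTokens Chunk =>
    let c1 := PySem.Str.strip (PySem.Str.lower Chunk)
    let c2 := ([".", "?", "!", ",", ";", ":", "(", ")", "[", "]", "\"", "'"] : List String).foldl
                (fun s p => PySem.Str.replace s p " ") c1
    AllTokens ++ [PySem.Str.split₀ c2]) []

-- ===== PORT B =====
def pvDelims : List Char := ['.', '?', '!', ',', ';', ':', '(', ')', '[', ']', '"', '\'']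

def pvIsDelim (c : Char) : Bool := PySem.Chars.isspace c || pvDelims.contains c

-- one scan over the lowered chunk, word accumulated in order (as Source B appends)
def pvTok : List Char → List Char → List String
  | [], word => if word.isEmpty then [] else [String.ofList word]
  | c :: rest, word =>
      if pvIsDelim c then
        (if word.isEmpty then pvTok rest [] else String.ofList word :: pvTok rest [])
      else pvTok rest (word ++ [c])

def ChunkTextCleaning_alt (Chunks : List String) : List (List String) :=
  Chunks.map (fun chunk => pvTok (PySem.Str.lower chunk).toList [])

-- ===== PRECONDITION & SPEC =====
def Spec_ChunkTextCleaning (Chunks : List String) (out : List (List String)) : Prop := out = ChunkTextCleaning_alt Chunks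
instance (Chunks : List String) (out : List (List String)) : Decidable (Spec_ChunkTextCleaning Chunks out) := by unfold Spec_ChunkTextCleaning; infer_instance

-- ===== CLAIM (what is proved, stated in full; the proofs are below) =====
def Claim_equal_ChunkTextCleaning : Prop := ∀ (Chunks : List String), Dom_ChunkTextCleaning Chunks → Spec_ChunkTextCleaning Chunks (ChunkTextCleaning Chunks)

-- ===== LEMMAS AND PROOFS =====

-- map a char to ' ' if it is one of the 12 punctuation delimiters, else keep it
def pvPunc (c : Char) : Char := if pvDelims.contains c then ' ' else c

theorem pvIsspace_pvPunc (c : Char) : PySem.Chars.isspace (pvPunc c) = pvIsDelim c := by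
  by_cases hc : c ∈ pvDelims
  · have h1 : pvDelims.contains c = true := by simpa [List.contains_eq_mem] using hc
    have h2 : PySem.Chars.isspace ' ' = true := by decide
    have h3 : pvPunc c = ' ' := by simp [pvPunc, hc]
    simp only [h3, h2, pvIsDelim, h1, Bool.or_true]
  · have h1 : pvDelims.contains c = false := by simpa [List.contains_eq_mem] using hc
    have h3 : pvPunc c = c := by simp [pvPunc, hc]
    simp only [h3, pvIsDelim, h1, Bool.or_false]

theorem pvPunc_of_not_delim (c : Char) (h : pvIsDelim c = false) : pvPunc c = c := by
  unfold pvIsDelim at h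
  simp only [Bool.or_eq_false_iff] at h
  have : ¬ c ∈ pvDelims := by simpa [List.contains_eq_mem] using h.2
  simp [pvPunc, this]

-- one single-char replace is a map
theorem pvReplace_go_map (q : Char) :
    ∀ (l acc : List Char),
      PySem.Chars.replace.go [q] [' '] l.length l acc
        = acc.reverse ++ l.map (fun c => if c = q then ' ' else c) := by
  intro l
  induction l with
  | nil => intro acc; simp [PySem.Chars.replace.go]
  | cons c t ih =>
      intro acc
      by_cases h : q = c
      · subst h
        simp [PySem.Chars.replace.go, List.isPrefixOf, ih]
      · have hpre : List.isPrefixOf [q] (c :: t) = false := by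
          simp [List.isPrefixOf]
          exact h
        simp [PySem.Chars.replace.go, hpre, ih, h, Ne.symm h]

theorem pvReplace_single (q : Char) (cs : List Char) :
    PySem.Chars.replace cs [q] [' '] = cs.map (fun c => if c = q then ' ' else c) := by
  simp [PySem.Chars.replace, pvReplace_go_map]

-- folding single-char replaces over a list of delimiters is one map
theorem pvFold_replace_map :
    ∀ (qs : List Char) (cs : List Char), qs.contains ' ' = false →
      qs.foldl (fun cs q => PySem.Chars.replace cs [q] [' ']) cs
        = cs.map (fun c => if qs.contains c then ' ' else c) := by
  intro qs
  induction qs with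
  | nil => intro cs _; simp
  | cons q qs ih =>
      intro cs hsp
      simp only [List.contains_cons, Bool.or_eq_false_iff] at hsp
      have hq : ¬ (' ' = q) := by simpa [beq_iff_eq] using hsp.1
      rw [List.foldl_cons, pvReplace_single, ih _ hsp.2, List.map_map]
      refine List.map_congr_left (fun c _ => ?_)
      by_cases hc : c = q
      · subst hc
        have h' : qs.contains ' ' = false := hsp.2
        simp [Function.comp, List.contains_cons, h']
      · simp [Function.comp, hc, List.contains_cons, beq_iff_eq, Ne.symm hc]

-- the split₀ scanner on the mapped string equals B's scanner
theorem pvSplit_go_tok :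
    ∀ (xs word : List Char) (acc : List (List Char)),
      List.map String.ofList (PySem.Chars.split₀.go (xs.map pvPunc) word.reverse acc)
        = (acc.reverse).map String.ofList ++ pvTok xs word := by
  intro xs
  induction xs with
  | nil =>
      intro word acc
      by_cases h : word = []
      · subst h; simp [PySem.Chars.split₀.go, pvTok]
      · simp [PySem.Chars.split₀.go, pvTok, h, List.isEmpty_iff]
  | cons c rest ih =>
      intro word acc
      by_cases hd : pvIsDelim c = true
      · have hs : PySem.Chars.isspace (pvPunc c) = true := by rw [pvIsspace_pvPunc]; exact hd
        by_cases h : word = []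
        · subst h
          have := ih [] acc
          simp [PySem.Chars.split₀.go, hs, pvTok, hd] at this ⊢
          exact this
        · have := ih [] (word :: acc)
          simp [PySem.Chars.split₀.go, hs, pvTok, hd, h, List.isEmpty_iff] at this ⊢
          simpa using this
      · have hd' : pvIsDelim c = false := by simpa using hd
        have hs : PySem.Chars.isspace (pvPunc c) = false := by rw [pvIsspace_pvPunc]; exact hd'
        have hp : pvPunc c = c := pvPunc_of_not_delim c hd'
        have hs2 : PySem.Chars.isspace c = false := by rw [← hp]; exact hs
        have := ih (word ++ [c]) acc
        simp [PySem.Chars.split₀.go, hp, hs2, pvTok, hd'] at this ⊢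
        simpa using this

-- trailing whitespace is ignored by B's scanner
theorem pvTok_all_space (ws : List Char) (h : ∀ c ∈ ws, PySem.Chars.isspace c = true) :
    ∀ word, pvTok ws word = pvTok [] word := by
  induction ws with
  | nil => intro word; rfl
  | cons w ws ih =>
      intro word
      have hw : pvIsDelim w = true := by
        simp [pvIsDelim, h w (by simp)]
      have ih' := ih (fun c hc => h c (by simp [hc]))
      by_cases hword : word = []
      · subst hword; simp [pvTok, hw, ih']
      · simp [pvTok, hw, hword, List.isEmpty_iff, ih']

theorem pvTok_append_space (xs ws : List Char) (h : ∀ c ∈ ws, PySem.Chars.isspace c = true) :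
    ∀ word, pvTok (xs ++ ws) word = pvTok xs word := by
  induction xs with
  | nil => intro word; simpa using pvTok_all_space ws h word
  | cons c xs ih =>
      intro word
      by_cases hd : pvIsDelim c = true
      · by_cases hword : word = []
        · subst hword; simp [pvTok, hd, ih]
        · simp [pvTok, hd, hword, List.isEmpty_iff, ih]
      · simp [pvTok, hd, ih]

-- leading whitespace is ignored by B's scanner
theorem pvTok_lstrip (xs : List Char) :
    pvTok (PySem.Chars.lstrip xs) [] = pvTok xs [] := by
  induction xs with
  | nil => rfl
  | cons c xs ih =>
      by_cases hs : PySem.Chars.isspace c = true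
      · have hd : pvIsDelim c = true := by simp [pvIsDelim, hs]
        simp [PySem.Chars.lstrip, List.dropWhile_cons, hs, pvTok, hd]
        simpa [PySem.Chars.lstrip] using ih
      · simp [PySem.Chars.lstrip, List.dropWhile_cons, hs]

theorem pvTok_strip (xs : List Char) :
    pvTok (PySem.Chars.strip xs) [] = pvTok xs [] := by
  unfold PySem.Chars.strip PySem.Chars.rstrip
  set ys := PySem.Chars.lstrip xs with hys
  have hdec : ys = (ys.reverse.dropWhile PySem.Chars.isspace).reverse
      ++ (ys.reverse.takeWhile PySem.Chars.isspace).reverse := by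
    have h := congrArg List.reverse
      (List.takeWhile_append_dropWhile (p := PySem.Chars.isspace) (l := ys.reverse))
    simp only [List.reverse_append, List.reverse_reverse] at h
    exact h.symm
  have hall : ∀ c ∈ (ys.reverse.takeWhile PySem.Chars.isspace).reverse,
      PySem.Chars.isspace c = true := by
    intro c hc
    exact List.mem_takeWhile_imp (by simpa using hc)
  calc pvTok (ys.reverse.dropWhile PySem.Chars.isspace).reverse []
      = pvTok ((ys.reverse.dropWhile PySem.Chars.isspace).reverse
          ++ (ys.reverse.takeWhile PySem.Chars.isspace).reverse) [] := by
        rw [pvTok_append_space _ _ hall]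
    _ = pvTok ys [] := by rw [← hdec]
    _ = pvTok xs [] := pvTok_lstrip xs

-- string-level fold of replaces = char-level fold
theorem pvFoldStr (t : String) :
    (([".", "?", "!", ",", ";", ":", "(", ")", "[", "]", "\"", "'"] : List String).foldl
        (fun s p => PySem.Str.replace s p " ") t).toList
      = pvDelims.foldl (fun cs q => PySem.Chars.replace cs [q] [' ']) t.toList := by
  simp only [List.foldl_cons, List.foldl_nil, PySem.Str.toList_replace, pvDelims]
  rfl

theorem pvMap_mk_toList (l : List String) :
    List.map String.ofList (List.map String.toList l) = l := by
  rw [List.map_map]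
  refine (List.map_congr_left (fun s _ => ?_)).trans (List.map_id l)
  exact String.ofList_toList (s := s)

-- the per-chunk equality
theorem pvChunk_eq (Chunk : String) :
    PySem.Str.split₀
        (([".", "?", "!", ",", ";", ":", "(", ")", "[", "]", "\"", "'"] : List String).foldl
          (fun s p => PySem.Str.replace s p " ")
          (PySem.Str.strip (PySem.Str.lower Chunk)))
      = pvTok (PySem.Str.lower Chunk).toList [] := by
  set t := PySem.Str.strip (PySem.Str.lower Chunk) with ht
  have h2 : t.toList = PySem.Chars.strip (PySem.Str.lower Chunk).toList := by
    rw [ht, PySem.Str.toList_strip]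
  have hfold := pvFoldStr t
  rw [pvFold_replace_map pvDelims t.toList (by decide)] at hfold
  have hmap : t.toList.map (fun c => if pvDelims.contains c then ' ' else c)
      = t.toList.map pvPunc := by
    refine List.map_congr_left (fun c _ => ?_)
    simp [pvPunc]
  rw [hmap] at hfold
  have key := pvSplit_go_tok t.toList [] []
  simp only [List.reverse_nil, List.map_nil, List.nil_append] at key
  have : List.map String.toList (PySem.Str.split₀
      (([".", "?", "!", ",", ";", ":", "(", ")", "[", "]", "\"", "'"] : List String).foldl
        (fun s p => PySem.Str.replace s p " ") t))
      = PySem.Chars.split₀ (t.toList.map pvPunc) := by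
    rw [PySem.Str.split₀_map_toList, hfold]
  have := congrArg (List.map String.ofList) this
  rw [pvMap_mk_toList] at this
  rw [this]
  show List.map String.ofList (PySem.Chars.split₀ (t.toList.map pvPunc)) = _
  unfold PySem.Chars.split₀
  rw [key, h2, pvTok_strip]

theorem pvFoldl_append {α β : Type} (g : α → β) :
    ∀ (l : List α) (acc : List β),
      l.foldl (fun a x => a ++ [g x]) acc = acc ++ l.map g := by
  intro l
  induction l with
  | nil => intro acc; simp
  | cons x xs ih => intro acc; simp [ih]

-- ===== VERDICT (by name: the statement is the Claim_ definition above) =====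
theorem ChunkTextCleaning_spec : Claim_equal_ChunkTextCleaning := by
  intro Chunks _
  show ChunkTextCleaning Chunks = ChunkTextCleaning_alt Chunks
  unfold ChunkTextCleaning ChunkTextCleaning_alt
  rw [pvFoldl_append]
  simp only [List.nil_append]
  exact List.map_congr_left (fun Chunk _ => pvChunk_eq Chunk)
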